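-- pv_equiv track=rewrite | github.com/EOSC-EDEN/wp2-service-validator | Validator.py | map_service_type
-- ===== SOURCE A (Python) =====
-- def map_service_type(service_title, available_types):
--     """
--     Maps a service title (e.g., 'SWORD API', 'RSS Feed') to a known Acronym (e.g., 'SWORD', 'RSS').
--     Performs case-insensitive substring matching.
--     """
--     if not service_title:
--         return None
--     title_lower = service_title.lower()
--     # Sort available types by length (descending) to match specific first (e.g. OGC-WMS before OGC)
--     for acr in sorted(available_types, key=len, reverse=True):
--         if acr.lower() in title_lower:
--             return acr
--     return None
-- ===== SOURCE B (Python) =====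
-- def map_service_type(service_title, available_types):
--     """Filter the matching acronyms, then take the longest (first on ties) with max(key=len); no sort."""
--     if not service_title:
--         return None
--     title_lower = service_title.lower()
--     matches = [a for a in available_types if a.lower() in title_lower]
--     return max(matches, key=len) if matches else None
-- ===== Notes on version B (the rewrite author's own statement) =====
-- stated objective: simpler
-- what changed: Replaced the stable descending length-sort plus first-match scan by a filter of the matching acronyms followed by max(matches, key=len), whose first-maximal tie-break reproduces the stable-sort behaviour.
import Mathlib
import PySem

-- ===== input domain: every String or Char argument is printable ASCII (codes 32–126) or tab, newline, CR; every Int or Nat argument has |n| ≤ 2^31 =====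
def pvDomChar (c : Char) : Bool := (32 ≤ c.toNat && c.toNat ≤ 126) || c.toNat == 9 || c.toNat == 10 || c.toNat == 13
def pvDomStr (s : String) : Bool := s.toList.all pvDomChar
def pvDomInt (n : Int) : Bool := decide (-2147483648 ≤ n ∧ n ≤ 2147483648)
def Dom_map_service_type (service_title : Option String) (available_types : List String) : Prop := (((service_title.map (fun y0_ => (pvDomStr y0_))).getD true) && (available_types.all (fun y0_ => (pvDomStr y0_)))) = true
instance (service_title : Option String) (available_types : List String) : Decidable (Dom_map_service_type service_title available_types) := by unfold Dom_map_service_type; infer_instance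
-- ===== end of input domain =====

-- B replaces A's stable descending length-sort + first-match scan by a filter of the
-- matching acronyms followed by max(matches, key=len); return values proved equal.

-- ===== PORT A =====
-- the 'for acr in sorted(...)' loop with its early return
def msLoop (title_lower : String) : List String → Option String
  | [] => none
  | acr :: rest =>
    if PySem.Str.isIn (PySem.Str.lower acr) title_lower then some acr
    else msLoop title_lower rest

def map_service_type (service_title : Option String) (available_types : List String) : Option String :=
  match service_title with
  | none => none
  | some t =>
    if t = "" then none
    else
      let title_lower := PySem.Str.lower t
      msLoop title_lower (PySem.List.sorted available_types (fun a => PySem.Str.len a) true)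

-- ===== PORT B =====
def map_service_type_alt (service_title : Option String) (available_types : List String) : Option String :=
  match service_title with
  | none => none
  | some t =>
    if t = "" then none
    else
      let title_lower := PySem.Str.lower t
      let hits := available_types.filter (fun a => PySem.Str.isIn (PySem.Str.lower a) title_lower)
      if hits = [] then none
      else PySem.List.max? hits (fun a => PySem.Str.len a)

-- ===== PRECONDITION & SPEC =====
def Spec_map_service_type (service_title : Option String) (available_types : List String) (out : Option String) : Prop := out = map_service_type_alt service_title available_types
instance (service_title : Option String) (available_types : List String) (out : Option String) : Decidable (Spec_map_service_type service_title available_types out) := by unfold Spec_map_service_type; infer_instance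

-- ===== CLAIM (what is proved, stated in full; the proofs are below) =====
def Claim_equal_map_service_type : Prop := ∀ (service_title : Option String) (available_types : List String), Dom_map_service_type service_title available_types → Spec_map_service_type service_title available_types (map_service_type service_title available_types)

-- ===== LEMMAS AND PROOFS =====

-- match predicate, the reverse-sort insertion step, the best-so-far scan (proof device
-- bridging A's sorted scan and B's max?-of-filter), and the current best length
def pvP (tl a : String) : Bool := PySem.Str.isIn (PySem.Str.lower a) tl

def pvIns (x : String) (acc : List String) : List String :=
  PySem.List.insertBy (fun a b => decide (PySem.Str.len b < PySem.Str.len a)) x acc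

def msScan (title_lower : String) (best : Option String) (best_len : Int) : List String → Option String
  | [] => best
  | acr :: rest =>
    if decide (best_len < PySem.Str.len acr) && PySem.Str.isIn (PySem.Str.lower acr) title_lower then
      msScan title_lower (some acr) (PySem.Str.len acr) rest
    else
      msScan title_lower best best_len rest

def pvBestLen : Option String → Int
  | none => -1
  | some m => PySem.Str.len m

theorem pv_len_nonneg (s : String) : 0 ≤ PySem.Str.len s := by
  simp [PySem.Str.len_eq]

theorem pv_ins_pairwise (x : String) (ys : List String)
    (hp : List.Pairwise (fun a b => PySem.Str.len b ≤ PySem.Str.len a) ys) :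
    List.Pairwise (fun a b => PySem.Str.len b ≤ PySem.Str.len a) (pvIns x ys) := by
  induction ys with
  | nil => simp [pvIns, PySem.List.insertBy]
  | cons y ys ih =>
    rcases List.pairwise_cons.mp hp with ⟨hy, hys⟩
    by_cases h : PySem.Str.len y < PySem.Str.len x
    · simp only [pvIns, PySem.List.insertBy, h, decide_true, if_true]
      refine List.pairwise_cons.mpr ⟨?_, hp⟩
      intro z hz
      rcases List.mem_cons.mp hz with hz | hz
      · subst hz; omega
      · have := hy z hz; omega
    · simp only [pvIns, PySem.List.insertBy, h, decide_false, Bool.false_eq_true, if_false]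
      refine List.pairwise_cons.mpr ⟨?_, ih hys⟩
      intro z hz
      rcases (PySem.List.mem_insertBy _ x z ys).mp hz with hz | hz
      · subst hz; omega
      · exact hy z hz

theorem pv_find_ins (tl x : String) (ys : List String)
    (hp : List.Pairwise (fun a b => PySem.Str.len b ≤ PySem.Str.len a) ys) :
    (pvIns x ys).find? (pvP tl) =
      if pvBestLen (ys.find? (pvP tl)) < PySem.Str.len x ∧ pvP tl x = true then some x
      else ys.find? (pvP tl) := by
  induction ys with
  | nil =>
    have h0 : (-1 : Int) < PySem.Str.len x := by have := pv_len_nonneg x; omega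
    by_cases hx : pvP tl x
    · rw [if_pos ⟨by simpa [pvBestLen] using h0, hx⟩]
      simp [pvIns, PySem.List.insertBy, hx]
    · rw [if_neg (by simp [hx])]
      simp [pvIns, PySem.List.insertBy, hx]
  | cons y ys ih =>
    rcases List.pairwise_cons.mp hp with ⟨hy, hys⟩
    have hunf : pvIns x (y :: ys) =
        if PySem.Str.len y < PySem.Str.len x then x :: y :: ys else y :: pvIns x ys := by
      simp only [pvIns, PySem.List.insertBy]
      by_cases h : PySem.Str.len y < PySem.Str.len x <;> simp
    by_cases h : PySem.Str.len y < PySem.Str.len x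
    · rw [hunf, if_pos h]
      have hlt : pvBestLen ((y :: ys).find? (pvP tl)) < PySem.Str.len x := by
        rcases hfind : (y :: ys).find? (pvP tl) with _ | m
        · simpa [pvBestLen] using (by have := pv_len_nonneg x; omega : (-1 : Int) < PySem.Str.len x)
        · have hm := List.mem_of_find?_eq_some hfind
          have hle : PySem.Str.len m ≤ PySem.Str.len y := by
            rcases List.mem_cons.mp hm with hm | hm
            · subst hm; omega
            · exact hy m hm
          simp only [pvBestLen]; omega
      by_cases hx : pvP tl x
      · rw [if_pos ⟨hlt, hx⟩]; simp [hx]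
      · rw [if_neg (by simp [hx])]; simp [hx]
    · rw [hunf, if_neg h]
      by_cases hyP : pvP tl y
      · have hge : ¬ (pvBestLen ((y :: ys).find? (pvP tl)) < PySem.Str.len x ∧ pvP tl x = true) := by
          simp only [List.find?_cons, hyP, pvBestLen, not_and]
          intro hlt _; omega
        rw [if_neg hge]
        simp [hyP]
      · have := ih hys
        simp only [List.find?_cons, hyP, Bool.false_eq_true] at *
        simpa [List.find?_cons, hyP] using this

theorem pv_main (tl : String) (xs acc : List String)
    (hp : List.Pairwise (fun a b => PySem.Str.len b ≤ PySem.Str.len a) acc) :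
    (xs.foldl (fun a x => pvIns x a) acc).find? (pvP tl) =
      msScan tl (acc.find? (pvP tl)) (pvBestLen (acc.find? (pvP tl))) xs := by
  induction xs generalizing acc with
  | nil => rfl
  | cons x xs ih =>
    have hstep := pv_find_ins tl x acc hp
    have hrec := ih (pvIns x acc) (pv_ins_pairwise x acc hp)
    by_cases hc : pvBestLen (acc.find? (pvP tl)) < PySem.Str.len x ∧ pvP tl x = true
    · rw [if_pos hc] at hstep
      simp only [List.foldl_cons, hrec, hstep, msScan]
      rw [if_pos (by simp only [Bool.and_eq_true, decide_eq_true_eq]; exact ⟨hc.1, hc.2⟩)]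
      simp [pvBestLen]
    · rw [if_neg hc] at hstep
      simp only [List.foldl_cons, hrec, hstep, msScan]
      rw [if_neg (by
        simp only [Bool.and_eq_true, decide_eq_true_eq]
        exact fun hcon => hc ⟨hcon.1, hcon.2⟩)]

theorem pv_msLoop_find (tl : String) (ys : List String) :
    msLoop tl ys = ys.find? (pvP tl) := by
  induction ys with
  | nil => rfl
  | cons y ys ih =>
    by_cases h : pvP tl y
    · have h' : PySem.Str.isIn (PySem.Str.lower y) tl = true := h
      simp only [msLoop, List.find?_cons, h]
      rw [if_pos h']
    · have h' : ¬ PySem.Str.isIn (PySem.Str.lower y) tl = true := h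
      simp only [msLoop, List.find?_cons, h, Bool.false_eq_true]
      rw [if_neg h']
      exact ih

-- the best-so-far scan over xs IS the first-maximal fold (max?) over the filtered list
theorem pv_scan_eq_max_fold (tl : String) (xs : List String) (best : Option String)
    (hb : ∀ m, best = some m → pvP tl m = true) :
    msScan tl best (pvBestLen best) xs =
      (xs.filter (pvP tl)).foldl
        (fun acc x =>
          match acc with
          | none => some x
          | some m => if PySem.Str.len m < PySem.Str.len x then some x else some m)
        best := by
  induction xs generalizing best with
  | nil => rfl
  | cons x xs ih =>
    by_cases hx : pvP tl x
    · have hx' : PySem.Str.isIn (PySem.Str.lower x) tl = true := hx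
      rcases best with _ | m
      · simp only [msScan, pvBestLen]
        split_ifs with h
        · simp only [List.filter_cons, hx, if_true, List.foldl_cons]
          simpa [pvBestLen] using ih (some x) (by intro m hm; cases hm; exact hx)
        · exfalso
          simp only [Bool.and_eq_true, decide_eq_true_eq] at h
          exact h ⟨by have := pv_len_nonneg x; omega, hx'⟩
      · simp only [msScan, pvBestLen]
        split_ifs with h
        · simp only [Bool.and_eq_true, decide_eq_true_eq] at h
          simp only [List.filter_cons, hx, if_true, List.foldl_cons, if_pos h.1]
          simpa [pvBestLen] using ih (some x) (by intro m' hm'; cases hm'; exact hx)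
        · simp only [Bool.and_eq_true, decide_eq_true_eq] at h
          have hlt : ¬ PySem.Str.len m < PySem.Str.len x := fun hl => h ⟨hl, hx'⟩
          simp only [List.filter_cons, hx, if_true, List.foldl_cons, if_neg hlt]
          simpa [pvBestLen] using ih (some m) hb
    · have hx' : ¬ PySem.Str.isIn (PySem.Str.lower x) tl = true := hx
      simp only [msScan]
      split_ifs with h
      · exact absurd (Bool.and_eq_true _ _ ▸ h).2 hx'
      · simp only [List.filter_cons, hx, Bool.false_eq_true, if_false]
        exact ih best hb

-- ===== VERDICT (by name: the statement is the Claim_ definition above) =====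
theorem map_service_type_spec : Claim_equal_map_service_type := by
  intro service_title available_types _
  unfold Spec_map_service_type
  rcases service_title with _ | t
  · rfl
  · simp only [map_service_type, map_service_type_alt]
    by_cases ht : t = ""
    · simp [ht]
    · simp only [ht, if_false]
      set tl := PySem.Str.lower t with htl
      have hchain : msLoop tl (PySem.List.sorted available_types (fun a => PySem.Str.len a) true)
          = PySem.List.max? (available_types.filter (pvP tl)) (fun a => PySem.Str.len a) := by
        rw [pv_msLoop_find, PySem.List.sorted_rev_eq_foldl_insertBy]
        have h1 := pv_main tl available_types [] List.Pairwise.nil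
        have h2 := pv_scan_eq_max_fold tl available_types none (by intro m hm; cases hm)
        simp only [pvIns] at h1
        simp only [List.find?_nil, pvBestLen] at h1
        simp only [pvBestLen] at h2
        rw [h1, h2]
        unfold PySem.List.max?
        congr 1
        funext acc x
        rcases acc <;> rfl
      by_cases hm : available_types.filter (pvP tl) = []
      · rw [if_pos (show available_types.filter
            (fun a => PySem.Str.isIn (PySem.Str.lower a) tl) = [] from hm)]
        rw [hchain, hm]
        rfl
      · rw [if_neg (show ¬ available_types.filter
            (fun a => PySem.Str.isIn (PySem.Str.lower a) tl) = [] from hm)]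
        exact hchain
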